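-- pv_equiv track=rewrite | github.com/amniz/samples | DS/ds13.py | checkana
-- ===== SOURCE A (Python) =====
-- def checkana(l):
--     ana=set()
--     cou=0
--     for i in l:
--         j=str(i)
--         k=sorted(j)
--         for j in [x for x in l[cou+1:len(l)]]:
--             h=str(j)
--             m=sorted(h)
--             if k==m:
--                 ana.add(i)
--                 ana.add(j)
--         cou+=1
--     return ana
-- ===== SOURCE B (Python) =====
-- def checkana(l):
--     groups = {}
--     for x in l:
--         k = ''.join(sorted(str(x)))
--         groups[k] = groups.get(k, []) + [x]
--     res = set()
--     for g in groups.values():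
--         if len(g) > 1:
--             res.update(g)
--     return res
-- ===== Notes on version B (the rewrite author's own statement) =====
-- stated objective: faster
-- what changed: Replaces A's O(n^2) all-pairs comparison of sorted-str(x) signatures by a single pass that groups the elements in a dict keyed by their sorted signature and then collects the groups of size > 1.
import Mathlib
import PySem

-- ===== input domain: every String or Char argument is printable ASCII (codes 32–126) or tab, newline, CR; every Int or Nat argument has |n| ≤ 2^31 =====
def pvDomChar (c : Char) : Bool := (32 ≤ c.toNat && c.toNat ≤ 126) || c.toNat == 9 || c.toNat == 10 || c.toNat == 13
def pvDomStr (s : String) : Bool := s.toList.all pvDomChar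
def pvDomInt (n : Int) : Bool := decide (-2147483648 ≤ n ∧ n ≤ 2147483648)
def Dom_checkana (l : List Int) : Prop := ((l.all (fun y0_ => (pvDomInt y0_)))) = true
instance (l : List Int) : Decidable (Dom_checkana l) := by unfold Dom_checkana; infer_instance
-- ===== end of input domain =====

-- B replaces A's quadratic all-pairs signature comparison by one dict pass grouping
-- elements by their sorted-digit signature and collecting the groups of size > 1 (objective: faster).

-- ===== PORT A =====
-- sorted(str(i)) — the anagram signature, computed by both programs
def pySig (i : Int) : List Char :=
  PySem.List.sorted (PySem.Int.toChars i) (fun c => c) false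

-- body of A's outer 'for i in l' loop; state = (ana, cou)
def stepA (l : List Int) (st : PySem.Set Int × Int) (i : Int) : PySem.Set Int × Int :=
  let k := pySig i
  let ana :=
    ((PySem.List.slice l (some (st.2 + 1)) (some (l.length : Int))).map (fun x => x)).foldl
      (fun ana j => if pySig j == k then PySem.Set.add (PySem.Set.add ana i) j else ana) st.1
  (ana, st.2 + 1)

def checkana (l : List Int) : List Int :=
  (l.foldl (stepA l) (PySem.Set.empty, 0)).1

-- ===== PORT B =====
-- body of B's grouping loop: groups[k] = groups.get(k, []) + [x]
def groupStep (d : PySem.Dict (List Char) (List Int)) (x : Int) : PySem.Dict (List Char) (List Int) :=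
  let k := pySig x
  d.insert k (d.getD k [] ++ [x])

def checkana_alt (l : List Int) : List Int :=
  let groups := l.foldl groupStep PySem.Dict.empty
  groups.values.foldl
    (fun res g => if 1 < g.length then PySem.Set.update res g else res) PySem.Set.empty

-- ===== PRECONDITION & SPEC =====
def Spec_checkana (l : List Int) (out : List Int) : Prop := out = checkana_alt l
instance (l : List Int) (out : List Int) : Decidable (Spec_checkana l out) := by unfold Spec_checkana; infer_instance

-- ===== CLAIM (what is proved, stated in full; the proofs are below) =====
def Claim_equal_checkana : Prop := ∀ (l : List Int), Dom_checkana l → Spec_checkana l (checkana l)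

-- ===== LEMMAS AND PROOFS =====

-- group of key k inside l: l's elements whose signature is k, in position order
def grp (l : List Int) (k : List Char) : List Int := l.filter (fun x => pySig x == k)

-- the common normal form: groups of size ≥ 2 in first-occurrence order, flattened
-- (fueled recursion; the fuel is irrelevant as soon as it dominates the length)
def qualF : Nat → List Int → List Int
  | _, [] => []
  | 0, _ :: _ => []
  | n + 1, i :: rest =>
    (if (rest.filter (fun x => pySig x == pySig i)).isEmpty then []
     else i :: rest.filter (fun x => pySig x == pySig i))
      ++ qualF n (rest.filter (fun x => !(pySig x == pySig i)))

def qual (l : List Int) : List Int := qualF l.length l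

theorem qualF_congr : ∀ (n m : Nat) (l : List Int), l.length ≤ n → l.length ≤ m →
    qualF n l = qualF m l := by
  intro n
  induction n with
  | zero =>
    intro m l h0 _
    have : l = [] := List.eq_nil_of_length_eq_zero (Nat.le_zero.mp h0)
    subst this
    cases m <;> rfl
  | succ n ih =>
    intro m l hn hm
    cases l with
    | nil => cases m <;> rfl
    | cons i rest =>
      cases m with
      | zero => simp at hm
      | succ m' =>
        simp only [qualF]
        congr 1
        have hf := List.length_filter_le (fun x => !(pySig x == pySig i)) rest
        simp only [List.length_cons] at hn hm
        exact ih m' _ (by omega) (by omega)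

-- A's loop, re-expressed structurally over the suffix it still has to process
def aRun (M : List Int) (s : PySem.Set Int) : PySem.Set Int :=
  match M with
  | [] => s
  | i :: rest =>
    aRun rest (rest.foldl
      (fun ana j => if pySig j == pySig i then PySem.Set.add (PySem.Set.add ana i) j else ana) s)

theorem qual_cons (i : Int) (rest : List Int) :
    qual (i :: rest) =
      (if (rest.filter (fun x => pySig x == pySig i)).isEmpty then []
       else i :: rest.filter (fun x => pySig x == pySig i))
        ++ qual (rest.filter (fun x => !(pySig x == pySig i))) := by
  show qualF (i :: rest).length (i :: rest) = _
  simp only [List.length_cons, qualF]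
  congr 1
  exact qualF_congr rest.length _ _ (List.length_filter_le _ _) le_rfl

theorem qual_nil : qual [] = [] := rfl

theorem update_of_mem (xs : List Int) (s : PySem.Set Int) (h : ∀ x ∈ xs, x ∈ s) :
    PySem.Set.update s xs = s := by
  induction xs generalizing s with
  | nil => simp [PySem.Set.update_nil]
  | cons x xs ih =>
    rw [PySem.Set.update_cons, PySem.Set.add_of_mem (h x List.mem_cons_self)]
    exact ih s (fun y hy => h y (List.mem_cons_of_mem _ hy))

theorem foldF (G : List Int) (s : PySem.Set Int) (i : Int) (hG : G ≠ []) :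
    G.foldl (fun ana j => PySem.Set.add (PySem.Set.add ana i) j) s
      = PySem.Set.update s (i :: G) := by
  induction G generalizing s with
  | nil => exact absurd rfl hG
  | cons j G' ih =>
    simp only [List.foldl_cons]
    by_cases hG' : G' = []
    · subst hG'
      simp [PySem.Set.update_cons, PySem.Set.update_nil]
    · rw [ih _ hG']
      have hadd : PySem.Set.add (PySem.Set.add (PySem.Set.add s i) j) i
          = PySem.Set.add (PySem.Set.add s i) j :=
        PySem.Set.add_of_mem (by simp [PySem.Set.mem_add])
      simp [PySem.Set.update_cons]

theorem filter_sub {α : Type} (l : List α) (p q : α → Bool)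
    (h : ∀ x, p x = true → q x = true) :
    (l.filter q).filter p = l.filter p := by
  induction l with
  | nil => simp
  | cons x l ih =>
    by_cases hp : p x = true
    · simp [hp, h x hp, ih]
    · by_cases hq : q x = true <;>
        simp [hp, hq, ih]

theorem filter_swap {α : Type} (l : List α) (p q : α → Bool) :
    (l.filter q).filter p = (l.filter p).filter q := by
  induction l with
  | nil => simp
  | cons x l ih =>
    by_cases hp : p x = true <;> by_cases hq : q x = true <;>
      simp [hp, hq, ih]

theorem eraseQual : ∀ (n : Nat) (rest : List Int) (s : PySem.Set Int) (k : List Char),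
    rest.length ≤ n → (∀ x ∈ rest, pySig x = k → x ∈ s) →
    PySem.Set.update s (qual rest)
      = PySem.Set.update s (qual (rest.filter (fun x => !(pySig x == k)))) := by
  intro n
  induction n with
  | zero =>
    intro rest s k hn _
    have : rest = [] := List.eq_nil_of_length_eq_zero (Nat.le_zero.mp hn)
    subst this; simp [qual_nil]
  | succ n ih =>
    intro rest s k hn hmem
    cases rest with
    | nil => simp [qual_nil]
    | cons j r =>
      by_cases hj : pySig j = k
      · have hfilter : (j :: r).filter (fun x => !(pySig x == k))
            = r.filter (fun x => !(pySig x == k)) := by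
          simp [hj]
        rw [hfilter, qual_cons, hj, PySem.Set.update_append]
        have hseg : PySem.Set.update s
            (if (r.filter (fun x => pySig x == k)).isEmpty then []
             else j :: r.filter (fun x => pySig x == k)) = s := by
          split
          · simp
          · apply update_of_mem
            intro x hx
            rcases List.mem_cons.mp hx with hxj | hxr
            · subst hxj; exact hmem x List.mem_cons_self hj
            · have hx' := List.mem_filter.mp hxr
              exact hmem x (List.mem_cons_of_mem _ hx'.1) (eq_of_beq hx'.2)
        rw [hseg]
      · have hjb : (pySig j == k) = false := beq_eq_false_iff_ne.mpr hj
        have hfilter : (j :: r).filter (fun x => !(pySig x == k))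
            = j :: r.filter (fun x => !(pySig x == k)) := by
          simp [hjb]
        rw [hfilter, qual_cons, qual_cons]
        have hsub : ∀ x : Int, (pySig x == pySig j) = true → (!(pySig x == k)) = true := by
          intro x hx
          have : pySig x = pySig j := eq_of_beq hx
          simp [this, hjb]
        have hseg : (r.filter (fun x => !(pySig x == k))).filter (fun x => pySig x == pySig j)
            = r.filter (fun x => pySig x == pySig j) :=
          filter_sub r _ _ hsub
        rw [hseg, PySem.Set.update_append, PySem.Set.update_append]
        have hcomm : (r.filter (fun x => !(pySig x == k))).filter (fun x => !(pySig x == pySig j))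
            = (r.filter (fun x => !(pySig x == pySig j))).filter (fun x => !(pySig x == k)) :=
          filter_swap r _ _
        rw [hcomm]
        apply ih
        · have h1 := List.length_filter_le (fun x => !(pySig x == pySig j)) r
          have h2 : (j :: r).length ≤ n + 1 := hn
          simp only [List.length_cons] at h2
          omega
        · intro x hx hxk
          have hx' := (List.mem_filter.mp hx).1
          exact (PySem.Set.mem_update _ _ _).mpr (Or.inl (hmem x (List.mem_cons_of_mem _ hx') hxk))

theorem aRun_eq (M : List Int) : ∀ (s : PySem.Set Int),
    aRun M s = PySem.Set.update s (qual M) := by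
  induction M with
  | nil => intro s; rw [aRun, qual_nil, PySem.Set.update_nil]
  | cons i rest ih =>
    intro s
    rw [aRun, qual_cons]
    rw [PySem.List.foldl_if_eq_foldl_filter (p := fun j => pySig j == pySig i)
      (f := fun ana j => PySem.Set.add (PySem.Set.add ana i) j)]
    by_cases hG : (rest.filter (fun x => pySig x == pySig i)).isEmpty
    · have hGnil : rest.filter (fun x => pySig x == pySig i) = [] :=
        List.isEmpty_iff.mp hG
      rw [hGnil]
      simp only [List.foldl_nil]
      rw [ih s]
      apply eraseQual rest.length rest s (pySig i) le_rfl
      intro x hx hxk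
      have : x ∈ rest.filter (fun x => pySig x == pySig i) :=
        List.mem_filter.mpr ⟨hx, by simp [hxk]⟩
      rw [hGnil] at this
      simp at this
    · have hGne : rest.filter (fun x => pySig x == pySig i) ≠ [] := by
        intro hnil; rw [hnil] at hG; exact hG rfl
      rw [foldF _ _ _ hGne, ih]
      rw [if_neg hG, PySem.Set.update_append]
      apply eraseQual rest.length rest _ (pySig i) le_rfl
      intro x hx hxk
      apply (PySem.Set.mem_update _ _ _).mpr
      refine Or.inr (List.mem_cons_of_mem _ ?_)
      exact List.mem_filter.mpr ⟨hx, by simp [hxk]⟩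

theorem loopA (l : List Int) : ∀ (rest pre : List Int) (s : PySem.Set Int),
    l = pre ++ rest →
    (rest.foldl (stepA l) (s, (pre.length : Int))).1 = aRun rest s := by
  intro rest
  induction rest with
  | nil => intro pre s _; simp [aRun]
  | cons i rest' ih =>
    intro pre s hl
    simp only [List.foldl_cons]
    have hslice : PySem.List.slice l (some ((pre.length : Int) + 1)) (some (l.length : Int))
        = rest' := by
      have hcast : ((pre.length : Int) + 1) = ((pre.length + 1 : Nat) : Int) := by push_cast; ring
      rw [hcast, PySem.List.slice_natCast]
      have hl' : l = (pre ++ [i]) ++ rest' := by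
        rw [hl]; simp
      have hlen : (pre ++ [i]).length = pre.length + 1 := by simp
      rw [hl', ← hlen, List.drop_left]
      simp
      omega
    have hstep : stepA l (s, (pre.length : Int)) i
        = (rest'.foldl
            (fun ana j => if pySig j == pySig i then PySem.Set.add (PySem.Set.add ana i) j else ana) s,
           (pre.length : Int) + 1) := by
      simp only [stepA, hslice]
      simp
    rw [hstep]
    have hcast : ((pre.length : Int) + 1) = (((pre ++ [i]).length : Nat) : Int) := by
      simp
    rw [hcast]
    rw [ih (pre ++ [i]) _ (by rw [hl]; simp)]
    rw [aRun]

-- ===== B side =====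

theorem groups_getD (l : List Int) (c : List Char) :
    (l.foldl groupStep PySem.Dict.empty).getD c [] = grp l c := by
  have hmod : groupStep = fun d x => PySem.Dict.modify d (pySig x) [] (fun v => v ++ [x]) := rfl
  rw [hmod]
  have hmap : (List.map (fun x => ((pySig x, x) : List Char × Int)) l).foldl
      (fun d p => PySem.Dict.modify d p.1 [] (fun v => v ++ [p.2])) PySem.Dict.empty
      = l.foldl (fun d x => PySem.Dict.modify d (pySig x) [] (fun v => v ++ [x]))
          PySem.Dict.empty := by
    rw [List.foldl_map]
  rw [← hmap, PySem.Dict.getD_foldl_modify_append]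
  simp [PySem.Dict.getD_empty, List.filter_map, List.map_map, Function.comp_def, grp]

theorem groups_keys (l : List Int) :
    (l.foldl groupStep PySem.Dict.empty).keys = PySem.Set.ofList (l.map pySig) := by
  have h : groupStep = fun d x => d.insert (pySig x) (d.getD (pySig x) [] ++ [x]) := rfl
  rw [h]
  rw [PySem.Dict.keys_foldl_insert_key (key := pySig)
    (f := fun d x => d.getD (pySig x) [] ++ [x])]
  simp [PySem.Dict.keys_empty, PySem.Set.update_nil_left]

theorem groups_keys_nodup (l : List Int) :
    (l.foldl groupStep PySem.Dict.empty).keys.Nodup := by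
  have h : groupStep = fun d x => d.insert (pySig x) (d.getD (pySig x) [] ++ [x]) := rfl
  rw [h]
  apply PySem.Dict.nodup_keys_foldl_insert_key
  simp [PySem.Dict.keys_empty]

theorem foldBig (l : List Int) : ∀ (ks : List (List Char)) (s : PySem.Set Int),
    ks.foldl (fun res k => if 1 < (grp l k).length then PySem.Set.update res (grp l k) else res) s
      = PySem.Set.update s
          ((ks.filter (fun k => decide (1 < (grp l k).length))).flatMap (grp l)) := by
  intro ks
  induction ks with
  | nil => intro s; simp
  | cons k ks ih =>
    intro s
    simp only [List.foldl_cons, List.filter_cons]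
    by_cases h : 1 < (grp l k).length
    · rw [if_pos h, if_pos (decide_eq_true h), List.flatMap_cons, PySem.Set.update_append, ih]
    · rw [if_neg h, if_neg (by simpa using h)]
      exact ih s

theorem flatMap_congr_mem {α β : Type} (l : List α) (f g : α → List β)
    (h : ∀ x ∈ l, f x = g x) : l.flatMap f = l.flatMap g := by
  induction l with
  | nil => simp
  | cons x l ih =>
    simp only [List.flatMap_cons]
    rw [h x List.mem_cons_self, ih (fun y hy => h y (List.mem_cons_of_mem _ hy))]

theorem discard_ofList_sig (rest : List Int) (k1 : List Char) :
    PySem.Set.discard (PySem.Set.ofList (rest.map pySig)) k1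
      = PySem.Set.ofList ((rest.filter (fun x => !(pySig x == k1))).map pySig) := by
  induction rest with
  | nil => rfl
  | cons x r ih =>
    by_cases h : (pySig x == k1) = true
    · have hx : pySig x = k1 := eq_of_beq h
      have hfil : (x :: r).filter (fun z => !(pySig z == k1))
          = r.filter (fun z => !(pySig z == k1)) := by
        simp [h]
      calc PySem.Set.discard (PySem.Set.ofList ((x :: r).map pySig)) k1
          = PySem.Set.discard
              (PySem.Set.discard (PySem.Set.ofList (r.map pySig)) k1) k1 := by
            rw [List.map_cons, PySem.Set.ofList_cons, hx]
            simp [PySem.Set.discard]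
        _ = PySem.Set.discard (PySem.Set.ofList (r.map pySig)) k1 :=
            filter_sub _ _ _ (fun y hy => hy)
        _ = PySem.Set.ofList (((x :: r).filter (fun z => !(pySig z == k1))).map pySig) := by
            rw [hfil, ih]
    · have hb : (pySig x == k1) = false := by
        cases hxx : (pySig x == k1) with
        | true => exact absurd hxx h
        | false => rfl
      have hfil : (x :: r).filter (fun z => !(pySig z == k1))
          = x :: r.filter (fun z => !(pySig z == k1)) := by
        simp [hb]
      rw [hfil, List.map_cons, List.map_cons, PySem.Set.ofList_cons, PySem.Set.ofList_cons,
        ← ih]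
      show List.filter (fun y => !(y == k1))
          (pySig x :: PySem.Set.discard (PySem.Set.ofList (r.map pySig)) (pySig x))
        = pySig x :: PySem.Set.discard
            (PySem.Set.discard (PySem.Set.ofList (r.map pySig)) k1) (pySig x)
      rw [List.filter_cons, if_pos (by simp [hb])]
      congr 1
      exact filter_swap (PySem.Set.ofList (r.map pySig)) _ _

theorem grp_cons_self (i : Int) (rest : List Int) :
    grp (i :: rest) (pySig i) = i :: rest.filter (fun x => pySig x == pySig i) := by
  simp [grp]

theorem qual_eq : ∀ (n : Nat) (l : List Int), l.length ≤ n →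
    ((PySem.Set.ofList (l.map pySig)).filter
        (fun k => decide (1 < (grp l k).length))).flatMap (grp l) = qual l := by
  intro n
  induction n with
  | zero =>
    intro l hl
    have : l = [] := List.eq_nil_of_length_eq_zero (Nat.le_zero.mp hl)
    subst this
    simp [qual_nil]
  | succ n ih =>
    intro l hl
    cases l with
    | nil => simp [qual_nil]
    | cons i rest =>
      have hkeys : PySem.Set.ofList ((i :: rest).map pySig)
          = pySig i :: PySem.Set.ofList
              ((rest.filter (fun x => !(pySig x == pySig i))).map pySig) := by
        rw [List.map_cons, PySem.Set.ofList_cons, discard_ofList_sig]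
      have hkmem : ∀ k, k ∈ PySem.Set.ofList
            ((rest.filter (fun x => !(pySig x == pySig i))).map pySig) →
          grp (i :: rest) k = grp (rest.filter (fun x => !(pySig x == pySig i))) k := by
        intro k hk
        have hk' : k ∈ (rest.filter (fun x => !(pySig x == pySig i))).map pySig :=
          (PySem.Set.mem_ofList _ _).mp hk
        obtain ⟨x, hx, hxk⟩ := List.mem_map.mp hk'
        have hxf := List.mem_filter.mp hx
        have hkne : pySig i ≠ k := by
          intro hkk
          have hxi : (pySig x == pySig i) = true := beq_iff_eq.mpr (hxk.trans hkk.symm)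
          have h2 := hxf.2
          rw [hxi] at h2
          simp at h2
        have h1 : grp (i :: rest) k = grp rest k := by
          have hib : (pySig i == k) = false := beq_eq_false_iff_ne.mpr hkne
          simp [grp, hib]
        have h2 : grp (rest.filter (fun x => !(pySig x == pySig i))) k = grp rest k := by
          unfold grp
          apply filter_sub
          intro y hy
          have hyk : pySig y = k := eq_of_beq hy
          have : (pySig y == pySig i) = false :=
            beq_eq_false_iff_ne.mpr (by rw [hyk]; exact fun h => hkne h.symm)
          simp [this]
        rw [h1, h2]
      have hlen : (rest.filter (fun x => !(pySig x == pySig i))).length ≤ n := by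
        have := List.length_filter_le (fun x => !(pySig x == pySig i)) rest
        simp only [List.length_cons] at hl
        omega
      have htail :
          ((PySem.Set.ofList ((rest.filter (fun x => !(pySig x == pySig i))).map pySig)).filter
              (fun k => decide (1 < (grp (i :: rest) k).length))).flatMap (grp (i :: rest))
            = qual (rest.filter (fun x => !(pySig x == pySig i))) := by
        rw [List.filter_congr (fun k hk => by rw [hkmem k hk])]
        rw [flatMap_congr_mem _ _ (grp (rest.filter (fun x => !(pySig x == pySig i))))
          (fun k hk => hkmem k (List.mem_of_mem_filter hk))]
        exact ih _ hlen
      rw [hkeys, List.filter_cons]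
      by_cases hbig : 1 < (grp (i :: rest) (pySig i)).length
      · have hne : ¬ (rest.filter (fun x => pySig x == pySig i)).isEmpty = true := by
          rw [grp_cons_self] at hbig
          simp only [List.length_cons] at hbig
          intro hemp
          rw [List.isEmpty_iff.mp hemp] at hbig
          simp at hbig
        rw [if_pos (by simpa using hbig)]
        rw [List.flatMap_cons, htail, grp_cons_self, qual_cons, if_neg hne]
      · have hemp : (rest.filter (fun x => pySig x == pySig i)).isEmpty = true := by
          rw [grp_cons_self] at hbig
          simp only [List.length_cons, Nat.lt_add_one_iff ] at hbig
          have : (rest.filter (fun x => pySig x == pySig i)).length = 0 := by omega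
          simpa [List.isEmpty_iff, List.length_eq_zero_iff] using this
        rw [if_neg (by simpa using hbig)]
        rw [htail, qual_cons, if_pos hemp, List.nil_append]

-- ===== VERDICT (by name: the statement is the Claim_ definition above) =====
theorem checkana_spec : Claim_equal_checkana := by
  unfold Claim_equal_checkana
  intro l _
  unfold Spec_checkana
  -- A side
  have hA : checkana l = PySem.Set.update PySem.Set.empty (qual l) := by
    have h1 := loopA l l [] PySem.Set.empty (by simp)
    simp only [List.length_nil, Nat.cast_zero] at h1
    unfold checkana
    rw [h1, aRun_eq]
  -- B side
  have hB : checkana_alt l = PySem.Set.update PySem.Set.empty (qual l) := by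
    show (l.foldl groupStep PySem.Dict.empty).values.foldl
        (fun res g => if 1 < g.length then PySem.Set.update res g else res) PySem.Set.empty
      = PySem.Set.update PySem.Set.empty (qual l)
    rw [PySem.Dict.values_eq_map_keys _ (groups_keys_nodup l) []]
    have hmap : List.map (fun k => (l.foldl groupStep PySem.Dict.empty).getD k [])
          (l.foldl groupStep PySem.Dict.empty).keys
        = List.map (grp l) (PySem.Set.ofList (l.map pySig)) := by
      rw [groups_keys]
      exact List.map_congr_left (fun k _ => groups_getD l k)
    rw [hmap, List.foldl_map]
    exact (foldBig l _ _).trans (by rw [qual_eq l.length l le_rfl])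
  rw [hA, hB]
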